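-- pv_equiv track=rewrite | github.com/pistachioL/AlphaVault | alphavault/domains/entity_match/resolve.py | _select_unique_mapping
-- ===== SOURCE A (Python) =====
-- def _clean_text(value: object) -> str:
--     return str(value or "").strip()
--
-- def _select_unique_mapping(
--     rows: list[tuple[str, str]],
-- ) -> dict[str, str]:
--     values_by_text: dict[str, set[str]] = {}
--     for raw_text, raw_entity_key in rows:
--         text = _clean_text(raw_text)
--         entity_key = _clean_text(raw_entity_key)
--         if not text or not entity_key:
--             continue
--         values_by_text.setdefault(text, set()).add(entity_key)
--     return {
--         text: next(iter(entity_keys))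
--         for text, entity_keys in values_by_text.items()
--         if len(entity_keys) == 1
--     }
-- ===== SOURCE B (Python) =====
-- def _clean_text(value: object) -> str:
--     return str(value or "").strip()
--
--
-- def _select_unique_mapping(rows):
--     # Stage 1: clean and deduplicate the (text, entity_key) pairs, keeping first-occurrence order.
--     pairs = list(dict.fromkeys(
--         pair
--         for pair in ((_clean_text(rt), _clean_text(rk)) for rt, rk in rows)
--         if pair[0] and pair[1]
--     ))
--     # Stage 2: count how many distinct keys each text has (= occurrences among distinct pairs).
--     text_counts = {}
--     for text, _ in pairs:
--         text_counts[text] = text_counts.get(text, 0) + 1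
--     # Stage 3: a text maps uniquely iff it appears exactly once among the distinct pairs.
--     return {text: key for text, key in pairs if text_counts[text] == 1}
-- ===== Notes on version B (the rewrite author's own statement) =====
-- stated objective: alternative
-- what changed: B replaces A's single grouping pass into per-text key sets (filtered by set size) with three staged passes: dedup the cleaned (text, key) pairs via dict.fromkeys, count occurrences of each text among the distinct pairs, and keep the pairs whose text occurs exactly once.
import Mathlib
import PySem

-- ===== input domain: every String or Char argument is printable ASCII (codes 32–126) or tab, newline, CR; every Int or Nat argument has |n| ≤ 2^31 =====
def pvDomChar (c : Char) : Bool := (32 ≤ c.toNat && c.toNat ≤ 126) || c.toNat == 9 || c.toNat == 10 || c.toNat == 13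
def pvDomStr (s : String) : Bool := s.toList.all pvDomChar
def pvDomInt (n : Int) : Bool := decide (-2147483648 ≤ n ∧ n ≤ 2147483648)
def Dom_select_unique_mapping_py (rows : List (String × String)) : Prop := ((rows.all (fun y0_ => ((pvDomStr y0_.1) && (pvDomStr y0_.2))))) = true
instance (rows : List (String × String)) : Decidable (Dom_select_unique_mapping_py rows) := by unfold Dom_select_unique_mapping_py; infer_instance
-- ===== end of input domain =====

-- B replaces A's one-pass grouping into per-text key sets (filtered by set size) by three staged
-- passes: dedup the cleaned pairs, count each text among the distinct pairs, keep count-1 texts (alternative).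


-- ===== PORT A =====
-- _clean_text: `value or ""` on a str is the str itself when non-empty, "" otherwise; str() of a str is itself
def clean_text (value : String) : String := PySem.Str.strip (if value = "" then "" else value)

-- loop body of A: `values_by_text.setdefault(text, set()).add(entity_key)` is
-- `values_by_text[text] = values_by_text.get(text, set()) ∪ {entity_key}`, i.e. Dict.modify
def suma_step (d : PySem.Dict String (PySem.Set String)) (row : String × String) :
    PySem.Dict String (PySem.Set String) :=
  let text := clean_text row.1
  let entity_key := clean_text row.2
  if text = "" ∨ entity_key = "" then d
  else d.modify text PySem.Set.empty (fun s => PySem.Set.add s entity_key)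

def select_unique_mapping_py (rows : List (String × String)) : List (String × String) :=
  let values_by_text := rows.foldl suma_step PySem.Dict.empty
  -- `next(iter(entity_keys))` is only taken when len(entity_keys) == 1: it is the unique
  -- element of the singleton set, so set-iteration order cannot matter — headD "" is exact here
  (values_by_text.items.filter (fun p => p.2.length == 1)).map (fun p => (p.1, p.2.headD ""))

-- ===== PORT B =====
-- the generator of cleaned pairs (a map, then the `if pair[0] and pair[1]` filter),
-- fed to dict.fromkeys = PySem.List.dedup (first occurrences, in order)
def sumb_cleaned (rows : List (String × String)) : List (String × String) :=
  (rows.map (fun r => (clean_text r.1, clean_text r.2))).filter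
    (fun p => !(p.1 == "") && !(p.2 == ""))

-- the text_counts loop: text_counts[text] = text_counts.get(text, 0) + 1
def sumb_counts (pairs : List (String × String)) : PySem.Dict String Int :=
  pairs.foldl (fun d p => d.insert p.1 (d.getD p.1 0 + 1)) PySem.Dict.empty

-- `text_counts[text]` can never miss (text comes from pairs), so getD 0 is exact for it
def select_unique_mapping_py_alt (rows : List (String × String)) : List (String × String) :=
  let pairs := PySem.List.dedup (sumb_cleaned rows)
  let text_counts := sumb_counts pairs
  (pairs.foldl
    (fun d p => if text_counts.getD p.1 0 == 1 then d.insert p.1 p.2 else d)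
    PySem.Dict.empty).items

-- ===== PRECONDITION & SPEC =====
def Spec_select_unique_mapping_py (rows : List (String × String)) (out : List (String × String)) : Prop := out = select_unique_mapping_py_alt rows
instance (rows : List (String × String)) (out : List (String × String)) : Decidable (Spec_select_unique_mapping_py rows out) := by unfold Spec_select_unique_mapping_py; infer_instance

-- ===== CLAIM (what is proved, stated in full; the proofs are below) =====
def Claim_equal_select_unique_mapping_py : Prop := ∀ (rows : List (String × String)), Dom_select_unique_mapping_py rows → Spec_select_unique_mapping_py rows (select_unique_mapping_py rows)

-- ===== LEMMAS AND PROOFS =====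

-- the set of distinct keys a text carries in a list of cleaned pairs
def keySetOf (L : List (String × String)) (t : String) : PySem.Set String :=
  PySem.Set.ofList ((L.filter (fun p => p.1 == t)).map (fun p => p.2))

-- A's fold over the raw rows is the grouping fold over the cleaned pairs
theorem suma_fold_eq_cleaned (rows : List (String × String))
    (d : PySem.Dict String (PySem.Set String)) :
    rows.foldl suma_step d =
      (sumb_cleaned rows).foldl
        (fun d p => d.modify p.1 PySem.Set.empty (fun s => PySem.Set.add s p.2)) d := by
  unfold sumb_cleaned
  rw [List.foldl_filter, List.foldl_map]
  congr 1
  funext d row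
  simp only [suma_step]
  by_cases h1 : clean_text row.1 = "" <;> by_cases h2 : clean_text row.2 = "" <;> simp [h1, h2]

-- getD of the grouping fold: the keys of t, folded with Set.add
theorem grouping_getD (L : List (String × String)) (d : PySem.Dict String (PySem.Set String))
    (t : String) :
    ((L.foldl (fun d p => d.modify p.1 PySem.Set.empty (fun s => PySem.Set.add s p.2)) d).getD
        t PySem.Set.empty) =
      ((L.filter (fun p => p.1 == t)).map (fun p => p.2)).foldl PySem.Set.add
        (d.getD t PySem.Set.empty) := by
  induction L generalizing d with
  | nil => rfl
  | cons p L ih =>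
    simp only [List.foldl_cons, List.filter_cons]
    rw [ih]
    by_cases h : p.1 = t
    · simp [h]
    · simp [h, PySem.Dict.getD_modify, Ne.symm h]

-- the items of the grouping fold from the empty dict
theorem grouping_items (L : List (String × String)) :
    (L.foldl (fun d p => d.modify p.1 PySem.Set.empty (fun s => PySem.Set.add s p.2))
        PySem.Dict.empty).items =
      (PySem.Set.ofList (L.map (fun p => p.1))).map (fun t => (t, keySetOf L t)) := by
  have hk : (L.foldl (fun d p => d.modify p.1 PySem.Set.empty (fun s => PySem.Set.add s p.2))
      PySem.Dict.empty).keys = PySem.Set.ofList (L.map (fun p => p.1)) := by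
    rw [PySem.Dict.keys_foldl_modify_key L (fun p => p.1) PySem.Set.empty
      (fun _ p s => PySem.Set.add s p.2) PySem.Dict.empty]
    simp [PySem.Set.update_nil_left, PySem.Dict.keys, PySem.Dict.empty]
  have hnd : (L.foldl (fun d p => d.modify p.1 PySem.Set.empty (fun s => PySem.Set.add s p.2))
      PySem.Dict.empty).keys.Nodup := by
    rw [hk]; exact PySem.Set.nodup_ofList _
  rw [PySem.Dict.items_eq_map_keys _ hnd PySem.Set.empty, hk]
  apply List.map_congr_left
  intro t _
  rw [grouping_getD L PySem.Dict.empty t]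
  simp [keySetOf, PySem.Set.ofList_eq_foldl, PySem.Set.empty, PySem.Dict.getD_empty]

-- B's counter: occurrences of t among the distinct pairs = distinct keys of t
theorem counts_getD (L : List (String × String)) (t : String) :
    (sumb_counts (PySem.List.dedup L)).getD t 0 = (((PySem.List.dedup L).map (fun p => p.1)).count t : Int) := by
  have hmap : ∀ (l : List (String × String)) (d : PySem.Dict String Int),
      l.foldl (fun d p => d.insert p.1 (d.getD p.1 0 + 1)) d =
        (l.map (fun p => p.1)).foldl (fun d x => d.insert x (d.getD x 0 + 1)) d :=
    fun l d => by rw [List.foldl_map]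
  rw [sumb_counts, hmap, PySem.Dict.getD_foldl_insert_add_one]
  simp [PySem.Dict.getD_empty]

theorem count_eq_keySet_length (L : List (String × String)) (t : String) :
    ((PySem.List.dedup L).map (fun p => p.1)).count t = (keySetOf L t).length := by
  have h1 : ((PySem.List.dedup L).map (fun p => p.1)).count t =
      (((PySem.List.dedup L).filter (fun p => p.1 == t)).map (fun p => p.2)).length := by
    rw [List.count_eq_countP, List.countP_map, List.length_map, List.countP_eq_length_filter]
    rfl
  rw [h1]
  have hndA : ((((PySem.List.dedup L).filter (fun p => p.1 == t))).map (fun p => p.2)).Nodup := by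
    refine List.Nodup.map_on ?_ ((PySem.List.nodup_dedup L).filter _)
    intro x hx y hy hxy
    have hx1 : x.1 = t := by simpa using (List.mem_filter.mp hx).2
    have hy1 : y.1 = t := by simpa using (List.mem_filter.mp hy).2
    exact Prod.ext (hx1.trans hy1.symm) hxy
  have hndB : (keySetOf L t).Nodup := PySem.Set.nodup_ofList _
  have hmem : ∀ k, k ∈ (((PySem.List.dedup L).filter (fun p => p.1 == t)).map (fun p => p.2)) ↔
      k ∈ keySetOf L t := by
    intro k
    simp [keySetOf, PySem.Set.mem_ofList, List.mem_filter, List.mem_map]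
  exact ((List.perm_ext_iff_of_nodup hndA hndB).mpr hmem).length_eq

-- the ordered heart: distinct pairs with a unique text, in pair-first-occurrence order,
-- are the unique texts in text-first-occurrence order, paired with their one key
theorem dedup_filter_eq (L xs : List (String × String)) (hsub : ∀ q ∈ xs, q ∈ L) :
    (PySem.List.dedup xs).filter (fun p => (keySetOf L p.1).length == 1) =
      ((PySem.Set.ofList (xs.map (fun p => p.1))).filter
          (fun t => (keySetOf L t).length == 1)).map
        (fun t => (t, (keySetOf L t).headD "")) := by
  revert hsub
  induction xs using List.reverseRecOn with
  | nil => intro _; simp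
  | append_singleton xs p ih =>
    intro hsub
    have hxs : ∀ q ∈ xs, q ∈ L := fun q hq => hsub q (List.mem_append_left _ hq)
    have hpL : p ∈ L := hsub p (by simp)
    have ih' := ih hxs
    rw [PySem.List.dedup_eq_ofList] at ih' ⊢
    rw [PySem.Set.ofList_append_singleton, List.map_append, List.map_cons, List.map_nil,
      PySem.Set.ofList_append_singleton]
    by_cases hmem : p ∈ xs
    · rw [PySem.Set.add_of_mem ((PySem.Set.mem_ofList _ _).mpr hmem),
        PySem.Set.add_of_mem ((PySem.Set.mem_ofList _ _).mpr (List.mem_map_of_mem hmem))]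
      exact ih'
    · rw [PySem.Set.add_of_not_mem (fun h => hmem ((PySem.Set.mem_ofList _ _).mp h)),
        List.filter_append]
      by_cases hc : ((keySetOf L p.1).length == 1) = true
      · have hp2 : p.2 ∈ keySetOf L p.1 := by
          simp only [keySetOf, PySem.Set.mem_ofList, List.mem_map, List.mem_filter]
          exact ⟨p, ⟨hpL, by simp⟩, rfl⟩
        have huniq : ∀ k ∈ keySetOf L p.1, k = p.2 := by
          intro k hk
          have hlen : (keySetOf L p.1).length = 1 := by simpa using hc
          obtain ⟨a, ha⟩ := List.length_eq_one_iff.mp hlen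
          rw [ha] at hk hp2
          simp only [List.mem_singleton] at hk hp2
          rw [hk, hp2]
        have htext : p.1 ∉ xs.map (fun p => p.1) := by
          intro hmm
          obtain ⟨q, hqx, hq1⟩ := List.mem_map.mp hmm
          have hq2 : q.2 ∈ keySetOf L p.1 := by
            simp only [keySetOf, PySem.Set.mem_ofList, List.mem_map, List.mem_filter]
            exact ⟨q, ⟨hxs q hqx, by simp [hq1]⟩, rfl⟩
          have hqp : q = p := Prod.ext hq1 (huniq q.2 hq2)
          exact hmem (hqp ▸ hqx)
        rw [PySem.Set.add_of_not_mem (fun h => htext ((PySem.Set.mem_ofList _ _).mp h)),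
          List.filter_append, List.map_append, ih']
        have hhead : (keySetOf L p.1).headD "" = p.2 := by
          obtain ⟨a, ha⟩ := List.length_eq_one_iff.mp (by simpa using hc)
          rw [ha]
          exact huniq a (by rw [ha]; simp)
        simp only [List.filter_cons, List.filter_nil, hc, if_pos, List.map_cons, List.map_nil,
          List.append_cancel_left_eq, List.cons.injEq, and_true]
        exact Prod.ext rfl hhead.symm
      · have hcf : ((keySetOf L p.1).length == 1) = false := by
          simpa using hc
        by_cases htext : p.1 ∈ PySem.Set.ofList (xs.map (fun p => p.1))
        · rw [PySem.Set.add_of_mem htext]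
          simpa [hcf] using ih'
        · rw [PySem.Set.add_of_not_mem htext, List.filter_append]
          simpa [hcf] using ih'

-- ===== VERDICT (by name: the statement is the Claim_ definition above) =====
theorem select_unique_mapping_py_spec : Claim_equal_select_unique_mapping_py := by
  intro rows _
  unfold Spec_select_unique_mapping_py
  simp only [select_unique_mapping_py, select_unique_mapping_py_alt]
  rw [suma_fold_eq_cleaned, grouping_items]
  rw [List.filter_map, List.map_map]
  rw [← List.foldl_filter]
  have hcond : ∀ p ∈ PySem.List.dedup (sumb_cleaned rows),
      ((sumb_counts (PySem.List.dedup (sumb_cleaned rows))).getD p.1 0 == 1) =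
        ((keySetOf (sumb_cleaned rows) p.1).length == 1) := by
    intro p _
    rw [counts_getD, count_eq_keySet_length]
    by_cases h : (keySetOf (sumb_cleaned rows) p.1).length = 1
    · rw [h]; rfl
    · have h2 : ((keySetOf (sumb_cleaned rows) p.1).length : Int) ≠ 1 := by exact_mod_cast h
      simp [h, h2]
  rw [List.filter_congr hcond]
  have hnodup : ((((PySem.List.dedup (sumb_cleaned rows)).filter
      (fun p => (keySetOf (sumb_cleaned rows) p.1).length == 1)).map (fun p => p.1))).Nodup := by
    rw [List.nodup_iff_count_le_one]
    intro a
    by_cases ha : a ∈ ((PySem.List.dedup (sumb_cleaned rows)).filter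
        (fun p => (keySetOf (sumb_cleaned rows) p.1).length == 1)).map (fun p => p.1)
    · obtain ⟨p, hp, rfl⟩ := List.mem_map.mp ha
      have hle := List.Sublist.count_le p.1 (List.Sublist.map (fun p => p.1)
        (List.filter_sublist (l := PySem.List.dedup (sumb_cleaned rows))
          (p := fun p => (keySetOf (sumb_cleaned rows) p.1).length == 1)))
      have hone : ((PySem.List.dedup (sumb_cleaned rows)).map (fun p => p.1)).count p.1 = 1 := by
        rw [count_eq_keySet_length]
        simpa using (List.mem_filter.mp hp).2
      omega
    · have h0 := List.count_eq_zero_of_not_mem ha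
      omega
  rw [PySem.Dict.items_foldl_insert_fresh
    ((PySem.List.dedup (sumb_cleaned rows)).filter
      (fun p => (keySetOf (sumb_cleaned rows) p.1).length == 1))
    (fun p => p.1) (fun p => p.2) PySem.Dict.empty
    (fun a _ => PySem.Dict.contains_empty _) hnodup]
  simp only [PySem.Dict.empty, List.nil_append]
  rw [show (fun (a : String × String) => (a.1, a.2)) = id from funext (fun a => rfl), List.map_id]
  have hmain := dedup_filter_eq (sumb_cleaned rows) (sumb_cleaned rows) (fun q h => h)
  simp only [Function.comp_def]
  exact hmain.symm
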